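-- pv_equiv track=rewrite | github.com/nizaevka/pycnfg | src/pycnfg/handler.py | _priority_arrange
-- ===== SOURCE A (Python) =====
-- import heapq
--
-- def _priority_arrange(res):
--     """Sort configuration by ``priority`` sub-key."""
--     min_heap = []
--     for key in res:
--         for subkey in res[key]:
--             val = res[key][subkey]
--             name = f'{key}__{subkey}'
--             # [alternative]
--             # name = subkey
--             priority = val['priority']
--             if not isinstance(priority, int) or priority < 0:
--                 raise ValueError('Configuration priority should'
--                                  ' be non-negative number.')
--             if priority:
--                 heapq.heappush(min_heap, (priority, (name, val)))
--     sorted_ = heapq.nsmallest(len(min_heap), min_heap)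
--     return list(zip(*sorted_))[1] if len(sorted_) > 0 else []
-- ===== SOURCE B (Python) =====
-- def _priority_arrange(res):
--     """Sort configuration by ``priority`` sub-key.
--
--     Keeps a list sorted by (priority, name) via ordered insertion instead of
--     a heap; never compares the val dicts themselves.
--     """
--     ordered = []  # kept sorted ascending by (priority, name)
--     for key, sub in res.items():
--         for subkey, val in sub.items():
--             priority = val['priority']
--             if not isinstance(priority, int) or priority < 0:
--                 raise ValueError('Configuration priority should'
--                                  ' be non-negative number.')
--             if priority:
--                 name = f'{key}__{subkey}'
--                 i = 0
--                 while i < len(ordered) and (ordered[i][0], ordered[i][1]) < (priority, name):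
--                     i += 1
--                 ordered.insert(i, (priority, name, val))
--     return tuple((name, val) for _, name, val in ordered) if ordered else []
-- ===== Notes on version B (the rewrite author's own statement) =====
-- stated objective: simpler
-- what changed: Replaces the heap (heappush + nsmallest) with a plain list kept sorted by ordered insertion on the (priority, name) key, iterates dict .items() directly instead of re-looking every key up, and never compares the val dicts themselves.
import Mathlib
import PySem

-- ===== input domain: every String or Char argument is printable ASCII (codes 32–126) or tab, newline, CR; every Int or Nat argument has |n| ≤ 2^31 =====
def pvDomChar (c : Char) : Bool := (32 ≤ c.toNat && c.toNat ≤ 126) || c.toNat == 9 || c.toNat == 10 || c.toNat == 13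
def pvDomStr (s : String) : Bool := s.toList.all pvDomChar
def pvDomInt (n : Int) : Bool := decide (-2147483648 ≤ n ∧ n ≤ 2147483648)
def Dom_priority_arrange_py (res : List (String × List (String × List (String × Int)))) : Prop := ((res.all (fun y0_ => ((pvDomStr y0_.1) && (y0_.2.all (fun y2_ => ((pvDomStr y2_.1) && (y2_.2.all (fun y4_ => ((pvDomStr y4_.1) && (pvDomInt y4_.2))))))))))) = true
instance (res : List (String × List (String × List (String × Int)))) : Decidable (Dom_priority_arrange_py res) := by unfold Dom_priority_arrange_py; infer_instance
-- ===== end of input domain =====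

-- B replaces the heap with a plain list kept sorted by ordered insertion on the (priority, name)
-- key and iterates the dict entries directly (objective: simpler); equivalence is about the return value.

-- ===== PORT A =====
-- The heap is represented by the list of pushed items in push order; heapq.nsmallest(len(h), h)
-- is ported as the stable sort by the Python comparison key, which under Pre_ (all (priority, name)
-- keys distinct, so comparison never reaches the val dicts) yields exactly Python's result.
def priority_arrange_py (res : List (String × List (String × List (String × Int)))) : List (String × (List (String × Int))) :=
  let min_heap : List (Int × String × List (String × Int)) :=
    res.foldl (fun heap kv =>
      let sub := PySem.Dict.getD (PySem.Dict.mk res) kv.1 []      -- res[key]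
      sub.foldl (fun heap2 skv =>
        let val := PySem.Dict.getD (PySem.Dict.mk sub) skv.1 []   -- res[key][subkey]
        let name := kv.1 ++ "__" ++ skv.1
        let priority := PySem.Dict.getD (PySem.Dict.mk val) "priority" 0  -- val['priority']; KeyError excluded by Pre_
        if priority ≠ 0 then heap2 ++ [(priority, name, val)] else heap2) heap) []
  let sorted_ := PySem.List.sorted min_heap (fun x => toLex (x.1, x.2.1)) false
  if sorted_.length > 0 then sorted_.map (fun x => x.2) else []

-- ===== PORT B =====
-- the while/insert loop of Source B: insert x before the first element whose (priority, name) key is not smaller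
def pvInsertOrdered (x : Int × String × List (String × Int)) :
    List (Int × String × List (String × Int)) → List (Int × String × List (String × Int))
  | [] => [x]
  | y :: ys => if toLex (y.1, y.2.1) < toLex (x.1, x.2.1) then y :: pvInsertOrdered x ys else x :: y :: ys

def priority_arrange_py_alt (res : List (String × List (String × List (String × Int)))) : List (String × (List (String × Int))) :=
  let ordered : List (Int × String × List (String × Int)) :=
    res.foldl (fun acc kv =>
      kv.2.foldl (fun acc2 skv =>
        let priority := PySem.Dict.getD (PySem.Dict.mk skv.2) "priority" 0
        if priority ≠ 0 then pvInsertOrdered (priority, kv.1 ++ "__" ++ skv.1, skv.2) acc2 else acc2) acc) []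
  ordered.map (fun x => x.2)

-- ===== PRECONDITION & SPEC =====
-- Pre_ excludes: (1) duplicate top-level keys and duplicate subkeys (a Python dict cannot hold
-- them; the association-list representation's first-match lookup makes their behaviour an artefact),
-- (2) entries whose val lacks a non-negative int 'priority' (A raises KeyError/ValueError),
-- (3) duplicate full names key__subkey (only reachable via '__' inside keys; there A's heap
-- comparison can reach the val dicts and raise TypeError).
def Pre_priority_arrange_py (res : List (String × List (String × List (String × Int)))) : Prop :=
  (res.map Prod.fst).Nodup ∧
  (∀ kv ∈ res, (kv.2.map Prod.fst).Nodup ∧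
      ∀ skv ∈ kv.2, 0 ≤ PySem.Dict.getD (PySem.Dict.mk skv.2) "priority" (-1)) ∧
  (res.flatMap (fun kv => kv.2.map (fun skv => kv.1 ++ "__" ++ skv.1))).Nodup
instance (res : List (String × List (String × List (String × Int)))) : Decidable (Pre_priority_arrange_py res) := by unfold Pre_priority_arrange_py; infer_instance

def pvWitness_priority_arrange_py : (List (String × List (String × List (String × Int)))) :=
  [("a", [("x", [("priority", 1)]), ("y", [("priority", 0)])]), ("b", [("x", [("priority", 2)])])]

def Spec_priority_arrange_py (res : List (String × List (String × List (String × Int)))) (out : List (String × (List (String × Int)))) : Prop := out = priority_arrange_py_alt res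
instance (res : List (String × List (String × List (String × Int)))) (out : List (String × (List (String × Int)))) : Decidable (Spec_priority_arrange_py res out) := by unfold Spec_priority_arrange_py; infer_instance

-- ===== CLAIM (what is proved, stated in full; the proofs are below) =====
def Claim_equal_priority_arrange_py : Prop := ∀ (res : List (String × List (String × List (String × Int)))), Dom_priority_arrange_py res → Pre_priority_arrange_py res → Spec_priority_arrange_py res (priority_arrange_py res)

-- ===== LEMMAS AND PROOFS =====

def pvKey (x : Int × String × List (String × Int)) : Int ×ₗ String := toLex (x.1, x.2.1)

def pvEntries (res : List (String × List (String × List (String × Int)))) : List (Int × String × List (String × Int)) :=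
  res.flatMap (fun kv =>
    (kv.2.filter (fun skv => PySem.Dict.getD (PySem.Dict.mk skv.2) "priority" 0 ≠ 0)).map
      (fun skv => (PySem.Dict.getD (PySem.Dict.mk skv.2) "priority" 0, kv.1 ++ "__" ++ skv.1, skv.2)))

theorem pv_lookup_self {α : Type} (l : List (String × α)) (d : α)
    (hnd : (l.map Prod.fst).Nodup) (kv : String × α) (hm : kv ∈ l) :
    PySem.Dict.getD (PySem.Dict.mk l) kv.1 d = kv.2 := by
  have h1 : (PySem.Dict.mk l).get? kv.1 = some kv.2 := by
    refine PySem.Dict.get?_of_mem_items _ ?_ ?_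
    · simpa using hm
    · simpa [PySem.Dict.keys] using hnd
  simp [PySem.Dict.getD, h1]

theorem pv_heap_eq_entries (res : List (String × List (String × List (String × Int))))
    (h : Pre_priority_arrange_py res) :
    (res.foldl (fun heap kv =>
      let sub := PySem.Dict.getD (PySem.Dict.mk res) kv.1 []
      sub.foldl (fun heap2 skv =>
        let val := PySem.Dict.getD (PySem.Dict.mk sub) skv.1 []
        let name := kv.1 ++ "__" ++ skv.1
        let priority := PySem.Dict.getD (PySem.Dict.mk val) "priority" 0
        if priority ≠ 0 then heap2 ++ [(priority, name, val)] else heap2) heap) []) = pvEntries res := by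
  obtain ⟨hnd, hsub, -⟩ := h
  rw [PySem.List.foldl_congr_mem _ _
    (fun heap kv => heap ++ (kv.2.filter (fun skv => PySem.Dict.getD (PySem.Dict.mk skv.2) "priority" 0 ≠ 0)).map
      (fun skv => (PySem.Dict.getD (PySem.Dict.mk skv.2) "priority" 0, kv.1 ++ "__" ++ skv.1, skv.2))) _ ?_]
  · exact PySem.List.foldl_append_eq_flatMap _ res []
  · intro acc kv hkv
    simp only
    rw [pv_lookup_self res [] hnd kv hkv]
    rw [PySem.List.foldl_congr_mem _ _
      (fun heap2 skv => if PySem.Dict.getD (PySem.Dict.mk skv.2) "priority" 0 ≠ 0 then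
          heap2 ++ [(PySem.Dict.getD (PySem.Dict.mk skv.2) "priority" 0, kv.1 ++ "__" ++ skv.1, skv.2)]
        else heap2) _ ?_]
    · exact PySem.List.foldl_append_ite _ _ kv.2 acc
    · intro acc2 skv hskv
      simp only
      rw [pv_lookup_self kv.2 [] (hsub kv hkv).1 skv hskv]

theorem pv_ordered_eq_fold (res : List (String × List (String × List (String × Int)))) :
    (res.foldl (fun acc kv =>
      kv.2.foldl (fun acc2 skv =>
        let priority := PySem.Dict.getD (PySem.Dict.mk skv.2) "priority" 0
        if priority ≠ 0 then pvInsertOrdered (priority, kv.1 ++ "__" ++ skv.1, skv.2) acc2 else acc2) acc) []) =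
    (pvEntries res).foldl (fun a y => pvInsertOrdered y a) [] := by
  rw [pvEntries, List.foldl_flatMap]
  refine (PySem.List.foldl_congr_mem _ _ _ _ ?_).symm
  intro acc kv _
  induction kv.2 generalizing acc with
  | nil => rfl
  | cons skv rest ih =>
    rw [List.filter_cons]
    by_cases hp : PySem.Dict.getD (PySem.Dict.mk skv.2) "priority" 0 ≠ 0
    · rw [if_pos (by simpa using hp), List.map_cons, List.foldl_cons, List.foldl_cons, ih]
      rw [if_pos hp]
    · rw [if_neg (by simpa using hp), List.foldl_cons, ih]
      rw [if_neg hp]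

theorem pvInsertOrdered_perm (x : Int × String × List (String × Int)) (ys : List (Int × String × List (String × Int))) :
    (pvInsertOrdered x ys).Perm (x :: ys) := by
  induction ys with
  | nil => simp [pvInsertOrdered]
  | cons y ys ih =>
    simp only [pvInsertOrdered]
    split
    · exact ((ih.cons y).trans (List.Perm.swap x y ys))
    · exact List.Perm.refl _

theorem pv_fold_perm (l acc : List (Int × String × List (String × Int))) :
    (l.foldl (fun a y => pvInsertOrdered y a) acc).Perm (acc ++ l) := by
  induction l generalizing acc with
  | nil => simp
  | cons x l ih =>
    simp only [List.foldl_cons]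
    refine (ih _).trans ?_
    refine (List.Perm.append_right l (pvInsertOrdered_perm x acc)).trans ?_
    simpa using (List.perm_middle (a := x) (l₁ := acc) (l₂ := l)).symm

theorem pv_mem_insertOrdered (b x : Int × String × List (String × Int))
    (ys : List (Int × String × List (String × Int))) :
    b ∈ pvInsertOrdered x ys ↔ b = x ∨ b ∈ ys := by
  induction ys with
  | nil => simp [pvInsertOrdered]
  | cons y ys ih =>
    simp only [pvInsertOrdered]
    split
    · simp only [List.mem_cons, ih]; tauto
    · simp [List.mem_cons]

theorem pvInsertOrdered_pairwise (x : Int × String × List (String × Int))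
    (ys : List (Int × String × List (String × Int)))
    (h : ys.Pairwise (fun a b => pvKey a ≤ pvKey b)) :
    (pvInsertOrdered x ys).Pairwise (fun a b => pvKey a ≤ pvKey b) := by
  induction ys with
  | nil => simp [pvInsertOrdered]
  | cons y ys ih =>
    rcases List.pairwise_cons.mp h with ⟨hy, hys⟩
    simp only [pvInsertOrdered]
    split
    · rename_i hlt
      refine List.pairwise_cons.mpr ⟨?_, ih hys⟩
      intro b hb
      rcases (pv_mem_insertOrdered b x ys).mp hb with rfl | hb'
      · exact le_of_lt hlt
      · exact hy b hb'
    · rename_i hnlt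
      refine List.pairwise_cons.mpr ⟨?_, h⟩
      intro b hb
      rcases List.mem_cons.mp hb with rfl | hb'
      · exact le_of_not_gt (by simpa [pvKey] using hnlt)
      · exact le_trans (le_of_not_gt (by simpa [pvKey] using hnlt)) (hy b hb')

theorem pv_fold_pairwise (l acc : List (Int × String × List (String × Int)))
    (h : acc.Pairwise (fun a b => pvKey a ≤ pvKey b)) :
    (l.foldl (fun a y => pvInsertOrdered y a) acc).Pairwise (fun a b => pvKey a ≤ pvKey b) := by
  induction l generalizing acc with
  | nil => simpa
  | cons x l ih => exact ih _ (pvInsertOrdered_pairwise x acc h)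

theorem pv_entries_key_nodup (res : List (String × List (String × List (String × Int))))
    (h : (res.flatMap (fun kv => kv.2.map (fun skv => kv.1 ++ "__" ++ skv.1))).Nodup) :
    ((pvEntries res).map pvKey).Nodup := by
  have hsub : ((pvEntries res).map (fun x => x.2.1)).Sublist
      (res.flatMap (fun kv => kv.2.map (fun skv => kv.1 ++ "__" ++ skv.1))) := by
    clear h
    rw [pvEntries, List.map_flatMap]
    induction res with
    | nil => simp
    | cons kv rest ih =>
      simp only [List.flatMap_cons]
      refine List.Sublist.append ?_ ih
      simpa [List.map_map, Function.comp] using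
        (List.filter_sublist (l := kv.2)).map (fun skv => kv.1 ++ "__" ++ skv.1)
  have hnames : ((pvEntries res).map (fun x => x.2.1)).Nodup := h.sublist hsub
  have heq : ((pvEntries res).map pvKey).map (fun k : Int ×ₗ String => (ofLex k).2) =
      (pvEntries res).map (fun x => x.2.1) := by
    rw [List.map_map]; rfl
  exact List.Nodup.of_map _ (heq ▸ hnames)

theorem pv_pairwise_lt_of_le_nodup (l : List (Int × String × List (String × Int)))
    (hle : l.Pairwise (fun a b => pvKey a ≤ pvKey b)) (hnd : (l.map pvKey).Nodup) :
    l.Pairwise (fun a b => pvKey a < pvKey b) := by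
  have hne : l.Pairwise (fun a b => pvKey a ≠ pvKey b) := List.pairwise_map.mp hnd
  exact (hle.and hne).imp (fun h => lt_of_le_of_ne h.1 h.2)

-- ===== VERDICT (by name: the statement is the Claim_ definition above) =====
theorem priority_arrange_py_spec : Claim_equal_priority_arrange_py := by
  intro res _ hpre
  unfold Spec_priority_arrange_py
  simp only [priority_arrange_py, priority_arrange_py_alt]
  rw [pv_heap_eq_entries res hpre, pv_ordered_eq_fold res]
  have hperm : ((pvEntries res).foldl (fun a y => pvInsertOrdered y a) []).Perm (pvEntries res) := by
    simpa using pv_fold_perm (pvEntries res) []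
  have hpw := pv_fold_pairwise (pvEntries res) [] (by simp)
  have hndL : (((pvEntries res).foldl (fun a y => pvInsertOrdered y a) []).map pvKey).Nodup :=
    ((hperm.map pvKey).nodup_iff).mpr (pv_entries_key_nodup res hpre.2.2)
  have hlt := pv_pairwise_lt_of_le_nodup _ hpw hndL
  have hs : PySem.List.sorted (pvEntries res) (fun x => toLex (x.1, x.2.1)) false =
      (pvEntries res).foldl (fun a y => pvInsertOrdered y a) [] :=
    PySem.List.sorted_eq_of_perm_of_pairwise_lt _ _ pvKey hperm hlt
  rw [hs]
  cases ((pvEntries res).foldl (fun a y => pvInsertOrdered y a) []) with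
  | nil => simp
  | cons a t => simp
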